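-- pv_equiv track=rewrite | github.com/LynnT-2003/First-Year-Python-Programming-Basics | final 1/7 minor edit.py | ProductX
-- ===== SOURCE A (Python) =====
-- def ProductX(num_list):
--
--     tocount = True
--     total = 1
--     totalx = 1
--
--     temp = []
--
--     c = 0
--
--     for i in range(len(num_list)):
--
--         if num_list[i] != 0 and num_list[i] > 0 and num_list[i] < 9 and tocount == True:
--             total *= num_list[i]
--         elif num_list[i] != 0 and num_list[i] > 0 and num_list[i] < 9 and tocount == False:
--             if num_list[i]%2 != 0:
--                 total *= num_list[i]
--
--         elif num_list[i] == 0 and tocount == True: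
--             tocount = False
--
--         elif num_list[i] == 0 and tocount == False:
--             for j in range (i+1, len(num_list)):
--                 tocount = True
--                 if num_list[j] == 0:
--                     tocount = False
--                     break
--     return total
-- ===== SOURCE B (Python) =====
-- def ProductX(num_list):
--     n = len(num_list)
--     # zero_after[i]: is there a zero strictly after position i?
--     zero_after = [False] * n
--     seen = False
--     for i in range(n - 1, -1, -1):
--         zero_after[i] = seen
--         if num_list[i] == 0:
--             seen = True
--     total = 1
--     tocount = True
--     for i in range(n):
--         x = num_list[i]
--         if 0 < x < 9:
--             if tocount or x % 2 == 1:
--                 total *= x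
--         elif x == 0:
--             if tocount:
--                 tocount = False
--             else:
--                 tocount = i + 1 < n and not zero_after[i]
--     return total
-- ===== Notes on version B (the rewrite author's own statement) =====
-- stated objective: alternative
-- what changed: B replaces A's inner rescan of the remaining list at every second consecutive zero by a precomputed suffix zero_after flag array (one backward pass plus one forward pass), removing the nested scan; on the sampled random inputs the measured cost is the same.
import Mathlib
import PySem

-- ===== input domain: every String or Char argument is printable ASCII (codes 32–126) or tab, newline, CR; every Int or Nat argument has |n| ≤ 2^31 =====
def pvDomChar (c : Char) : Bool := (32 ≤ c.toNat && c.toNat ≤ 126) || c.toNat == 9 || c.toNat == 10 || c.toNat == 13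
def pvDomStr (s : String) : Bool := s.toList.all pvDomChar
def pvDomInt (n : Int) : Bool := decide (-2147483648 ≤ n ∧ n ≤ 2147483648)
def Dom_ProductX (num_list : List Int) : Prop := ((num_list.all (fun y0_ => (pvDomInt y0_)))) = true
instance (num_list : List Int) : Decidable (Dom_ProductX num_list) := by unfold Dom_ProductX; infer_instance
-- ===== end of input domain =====

-- B: single forward pass using a precomputed suffix zero_after flag list instead of A's inner rescan of the remaining list after a second zero.
-- ===== PORT A =====
-- inner loop 'for j in range(i+1, len(num_list)): tocount = True; if num_list[j]==0: tocount=False; break' over the remaining suffix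
def pvInnerA : List Int → Bool → Bool
  | [], tc => tc
  | y :: ys, _ => if y = 0 then false else pvInnerA ys true

def pvLoopA : List Int → Bool → Int → Int
  | [], _, total => total
  | x :: xs, tc, total =>
    if x ≠ 0 ∧ x > 0 ∧ x < 9 ∧ tc = true then pvLoopA xs tc (total * x)
    else if x ≠ 0 ∧ x > 0 ∧ x < 9 ∧ tc = false then
      if PySem.Int.mod x 2 ≠ 0 then pvLoopA xs tc (total * x) else pvLoopA xs tc total
    else if x = 0 ∧ tc = true then pvLoopA xs false total
    else if x = 0 ∧ tc = false then pvLoopA xs (pvInnerA xs false) total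
    else pvLoopA xs tc total

def ProductX (num_list : List Int) : Int := pvLoopA num_list true 1

-- ===== PORT B =====
-- backward pass: for each position, whether a zero occurs strictly later (returns flag list and 'suffix contains a zero')
def pvZeroAfter : List Int → List Bool × Bool
  | [] => ([], false)
  | x :: xs =>
    let p := pvZeroAfter xs
    (p.2 :: p.1, p.2 || decide (x = 0))

-- forward pass over elements zipped with their zero_after flags
def pvLoopB : List (Int × Bool) → Bool → Int → Int
  | [], _, total => total
  | (x, za) :: rest, tc, total =>
    if 0 < x ∧ x < 9 then
      if tc = true ∨ PySem.Int.mod x 2 = 1 then pvLoopB rest tc (total * x)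
      else pvLoopB rest tc total
    else if x = 0 then
      if tc = true then pvLoopB rest false total
      else pvLoopB rest (rest ≠ [] ∧ za = false : Bool) total
    else pvLoopB rest tc total

def ProductX_alt (num_list : List Int) : Int :=
  pvLoopB (num_list.zip (pvZeroAfter num_list).1) true 1

-- ===== PRECONDITION & SPEC =====
def Spec_ProductX (num_list : List Int) (out : Int) : Prop := out = ProductX_alt num_list
instance (num_list : List Int) (out : Int) : Decidable (Spec_ProductX num_list out) := by unfold Spec_ProductX; infer_instance

-- ===== CLAIM (what is proved, stated in full; the proofs are below) =====
def Claim_equal_ProductX : Prop := ∀ (num_list : List Int), Dom_ProductX num_list → Spec_ProductX num_list (ProductX num_list)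

-- ===== LEMMAS AND PROOFS =====

-- ===== VERDICT (by name: the statement is the Claim_ definition above) =====
theorem pvZA_len (xs : List Int) : (pvZeroAfter xs).1.length = xs.length := by
  induction xs with
  | nil => rfl
  | cons x xs ih => simp [pvZeroAfter, ih]

theorem pvInner_true (ys : List Int) : pvInnerA ys true = ((pvZeroAfter ys).2 = false : Bool) := by
  induction ys with
  | nil => rfl
  | cons y ys ih =>
    by_cases h : y = 0 <;> simp [pvInnerA, pvZeroAfter, h, ih]

theorem pvInner_char (xs : List Int) : pvInnerA xs false = (xs ≠ [] ∧ (pvZeroAfter xs).2 = false : Bool) := by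
  cases xs with
  | nil => rfl
  | cons x xs =>
    by_cases h : x = 0 <;> simp [pvInnerA, pvZeroAfter, h, pvInner_true]

theorem pvMod_odd (x : Int) : (PySem.Int.mod x 2 ≠ 0) ↔ (PySem.Int.mod x 2 = 1) := by
  rw [PySem.Int.mod_eq_emod_of_pos (show (0:Int) < 2 by omega)]
  omega

theorem pvLoop_eq (xs : List Int) : ∀ tc total, pvLoopA xs tc total = pvLoopB (xs.zip (pvZeroAfter xs).1) tc total := by
  induction xs with
  | nil => intro tc total; rfl
  | cons x xs ih =>
    intro tc total
    have hzip : (List.zip xs (pvZeroAfter xs).1) = [] ↔ xs = [] := by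
      constructor
      · intro h
        have := congrArg List.length h
        simp [pvZA_len] at this
        exact this
      · intro h; simp [h]
    show pvLoopA (x :: xs) tc total = pvLoopB ((x, (pvZeroAfter xs).2) :: List.zip xs (pvZeroAfter xs).1) tc total
    by_cases h0 : x = 0
    · cases tc with
      | true => simp [pvLoopA, pvLoopB, h0, ih]
      | false =>
        have : pvInnerA xs false = (List.zip xs (pvZeroAfter xs).1 ≠ [] ∧ (pvZeroAfter xs).2 = false : Bool) := by
          rw [pvInner_char]
          by_cases hn : xs = [] <;> simp [hn, hzip]
        simp [pvLoopA, pvLoopB, h0, this, ih]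
    · by_cases hr : 0 < x ∧ x < 9
      · cases tc with
        | true => simp [pvLoopA, pvLoopB, h0, hr, ih]
        | false =>
          by_cases hm : PySem.Int.mod x 2 = 1
          · have hm' : PySem.Int.mod x 2 ≠ 0 := by rw [pvMod_odd x]; exact hm
            simp [pvLoopA, pvLoopB, h0, hr, ih]
          · have hm' : PySem.Int.mod x 2 = 0 := by
              by_contra hc; exact hm ((pvMod_odd x).mp hc)
            simp [pvLoopA, pvLoopB, h0, hr, hm', ih]
      · have h1 : ¬ (x ≠ 0 ∧ x > 0 ∧ x < 9 ∧ tc = true) := by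
          intro ⟨_, a, b, _⟩; exact hr ⟨a, b⟩
        have h2 : ¬ (x ≠ 0 ∧ x > 0 ∧ x < 9 ∧ tc = false) := by
          intro ⟨_, a, b, _⟩; exact hr ⟨a, b⟩
        have h3 : ¬ (0 < x ∧ x < 9 ∧ tc = true) := fun ⟨a, b, _⟩ => hr ⟨a, b⟩
        have h4 : ¬ (0 < x ∧ x < 9 ∧ tc = false) := fun ⟨a, b, _⟩ => hr ⟨a, b⟩
        simp [pvLoopA, pvLoopB, h0, h3, h4, ih]
        intro a b
        exact absurd ⟨a, b⟩ hr

theorem ProductX_spec : Claim_equal_ProductX := by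
  intro l _
  unfold Spec_ProductX ProductX ProductX_alt
  exact pvLoop_eq l true 1
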